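-- pv_equiv track=rewrite | github.com/sl-harris/aoc-2024 | day4/main.py | find_mas_rl
-- ===== SOURCE A (Python) =====
-- def find_mas_rl(input, coord, is_rev=False):
--     mas_centre = []
--
--     for line, (start_x, start_y) in zip(input, coord):
--         last_found = -1
--
--         for _ in range(line.count("MAS")):
--             last_found = line.find("MAS", last_found + 1)
--
--             if not is_rev:
--                 mas_centre.append((start_x + last_found + 1, start_y + last_found + 1))
--             else:
--                 mas_centre.append(
--                     (
--                         start_x + len(line) - last_found - 2,
--                         start_y + len(line) - last_found - 2,
--                     )
--                 )
--
--     return mas_centre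
-- ===== SOURCE B (Python) =====
-- def find_mas_rl(input, coord, is_rev=False):
--     mas_centre = []
--
--     for line, (start_x, start_y) in zip(input, coord):
--         n = len(line)
--         for i in range(n - 2):
--             if line[i:i + 3] == "MAS":
--                 c = n - i - 2 if is_rev else i + 1
--                 mas_centre.append((start_x + c, start_y + c))
--
--     return mas_centre
-- ===== Notes on version B (the rewrite author's own statement) =====
-- stated objective: alternative
-- what changed: Replaced A's two-pass count-then-repeated-find with stateful last_found by a single stateless left-to-right window scan that tests line[i:i+3] == 'MAS' and computes each centre directly from i.
import Mathlib
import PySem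

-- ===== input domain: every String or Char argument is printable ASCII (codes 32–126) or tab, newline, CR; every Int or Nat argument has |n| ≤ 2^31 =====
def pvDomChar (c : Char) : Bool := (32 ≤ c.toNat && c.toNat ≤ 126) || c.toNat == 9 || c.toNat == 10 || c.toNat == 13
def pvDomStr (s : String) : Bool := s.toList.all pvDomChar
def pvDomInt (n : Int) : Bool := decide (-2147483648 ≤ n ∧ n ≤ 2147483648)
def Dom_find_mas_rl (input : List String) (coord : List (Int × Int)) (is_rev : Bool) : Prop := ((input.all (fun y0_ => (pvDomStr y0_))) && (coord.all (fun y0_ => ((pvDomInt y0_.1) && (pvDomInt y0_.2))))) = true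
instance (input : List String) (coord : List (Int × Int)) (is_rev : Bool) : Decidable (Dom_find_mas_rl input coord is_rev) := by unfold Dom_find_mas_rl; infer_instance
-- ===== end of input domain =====

-- B replaces A's count-then-repeated-find two-pass with a single window scan; return values proved equal on all inputs (A mutates nothing).

-- ===== PORT A =====
def find_mas_rl (input : List String) (coord : List (Int × Int)) (is_rev : Bool) : List (Int × Int) :=
  (input.zip coord).foldl (fun mas_centre p =>
    let line := p.1
    let start_x := p.2.1
    let start_y := p.2.2
    ((PySem.List.pyRange 0 ((PySem.Str.count line "MAS" : Nat) : Int) 1).foldl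
      (fun (st : Int × List (Int × Int)) _ =>
        let last_found := PySem.Str.findFrom line "MAS" (st.1 + 1) none
        if !is_rev then
          (last_found, st.2 ++ [(start_x + last_found + 1, start_y + last_found + 1)])
        else
          (last_found, st.2 ++ [(start_x + PySem.Str.len line - last_found - 2,
                                 start_y + PySem.Str.len line - last_found - 2)]))
      ((-1 : Int), mas_centre)).2) []

-- ===== PORT B =====
def find_mas_rl_alt (input : List String) (coord : List (Int × Int)) (is_rev : Bool) : List (Int × Int) :=
  (input.zip coord).foldl (fun mas_centre p =>
    let line := p.1
    let start_x := p.2.1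
    let start_y := p.2.2
    let n := PySem.Str.len line
    (PySem.List.pyRange 0 (n - 2) 1).foldl
      (fun acc i =>
        if PySem.Str.slice line (some i) (some (i + 3)) == "MAS" then
          let c := if is_rev then n - i - 2 else i + 1
          acc ++ [(start_x + c, start_y + c)]
        else acc) mas_centre) []

-- ===== PRECONDITION & SPEC =====
def Spec_find_mas_rl (input : List String) (coord : List (Int × Int)) (is_rev : Bool) (out : List (Int × Int)) : Prop := out = find_mas_rl_alt input coord is_rev
instance (input : List String) (coord : List (Int × Int)) (is_rev : Bool) (out : List (Int × Int)) : Decidable (Spec_find_mas_rl input coord is_rev out) := by unfold Spec_find_mas_rl; infer_instance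

-- ===== CLAIM (what is proved, stated in full; the proofs are below) =====
def Claim_equal_find_mas_rl : Prop := ∀ (input : List String) (coord : List (Int × Int)) (is_rev : Bool), Dom_find_mas_rl input coord is_rev → Spec_find_mas_rl input coord is_rev (find_mas_rl input coord is_rev)

-- ===== LEMMAS AND PROOFS =====

def pvMAS : List Char := ['M', 'A', 'S']

-- positions (absolute, starting offset k) at which "MAS" occurs in the char list
def pvSpecL : List Char → Nat → List Nat
  | [], _ => []
  | c :: t, k => if pvMAS.isPrefixOf (c :: t) then k :: pvSpecL t (k + 1) else pvSpecL t (k + 1)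

theorem pvSpecL_shift (t : List Char) : ∀ k, pvSpecL t k = (pvSpecL t 0).map (· + k) := by
  induction t with
  | nil => intro k; simp [pvSpecL]
  | cons c t ih =>
    intro k
    simp only [pvSpecL]
    by_cases h : pvMAS.isPrefixOf (c :: t) = true
    · simp [h, ih (k+1), ih 1, Function.comp, Nat.add_comm, Nat.add_assoc, Nat.add_left_comm]
    · simp [h, ih (k+1), ih 1, Function.comp, Nat.add_comm, Nat.add_assoc, Nat.add_left_comm]

theorem pvSpecL_lt_length {t : List Char} {k x : Nat} (hx : x ∈ pvSpecL t k) : x < k + t.length := by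
  induction t generalizing k with
  | nil => simp [pvSpecL] at hx
  | cons c t ih =>
    simp only [pvSpecL] at hx
    split at hx
    · rcases List.mem_cons.1 hx with h | h
      · subst h; simp
      · have := ih h; simp at this ⊢; omega
    · have := ih hx; simp at this ⊢; omega

theorem pvSpecL_le {t : List Char} {k x : Nat} (hx : x ∈ pvSpecL t k) : k ≤ x := by
  rw [pvSpecL_shift] at hx
  obtain ⟨y, _, rfl⟩ := List.mem_map.1 hx
  omega

theorem pvSpecL_pairwise (t : List Char) (k : Nat) : (pvSpecL t k).Pairwise (· < ·) := by
  induction t generalizing k with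
  | nil => simp [pvSpecL]
  | cons c t ih =>
    simp only [pvSpecL]
    split
    · exact List.Pairwise.cons (fun y hy => Nat.lt_of_lt_of_le (Nat.lt_succ_self k) (pvSpecL_le hy)) (ih (k+1))
    · exact ih (k+1)

-- dropping m characters keeps exactly the occurrences at positions ≥ m
theorem pvSpecL_drop (m : Nat) : ∀ (s : List Char),
    pvSpecL (s.drop m) 0 = ((pvSpecL s 0).filter (fun x => decide (m ≤ x))).map (· - m) := by
  induction m with
  | zero =>
    intro s
    have h1 : (pvSpecL s 0).filter (fun x => decide (0 ≤ x)) = pvSpecL s 0 :=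
      List.filter_eq_self.2 (fun x _ => by simp)
    simp [h1]
  | succ m ih =>
    intro s
    cases s with
    | nil => simp [pvSpecL]
    | cons c t =>
      have hdrop : (c :: t).drop (m + 1) = t.drop m := rfl
      rw [hdrop, ih t]
      have hspec : pvSpecL (c :: t) 0 =
          (if pvMAS.isPrefixOf (c :: t) then [0] else []) ++ (pvSpecL t 0).map (· + 1) := by
        simp only [pvSpecL, pvSpecL_shift t 1]
        split <;> simp
      rw [hspec]
      rw [List.filter_append, List.filter_map]
      have h0 : ((if pvMAS.isPrefixOf (c :: t) then [0] else []).filter (fun x => decide (m + 1 ≤ x))) = [] := by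
        split <;> simp
      have h2 : ((fun x => decide (m + 1 ≤ x)) ∘ (· + 1)) = (fun x => decide (m ≤ x)) := by
        funext x; simp [Function.comp]
      rw [h0, h2]
      simp only [List.nil_append, List.map_map]
      apply List.map_congr_left
      intro x _
      simp [Function.comp]

theorem pvFindGo (t : List Char) : ∀ k : Nat, PySem.Chars.find.go pvMAS t k =
    match pvSpecL t k with | [] => -1 | j :: _ => (j : Int) := by
  induction t with
  | nil => intro k; simp [PySem.Chars.find.go, pvSpecL, pvMAS]
  | cons c t ih =>
    intro k
    rw [PySem.Chars.find.go]
    simp only [pvSpecL]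
    by_cases h : pvMAS.isPrefixOf (c :: t) = true
    · simp [h]
    · simp only [h, Bool.false_eq_true, if_false, if_neg h]
      have := ih (k + 1)
      simpa using this

theorem pvSpecL_length_shift (t : List Char) (k : Nat) :
    (pvSpecL t k).length = (pvSpecL t 0).length := by
  rw [pvSpecL_shift t k, List.length_map]

theorem pvCountGo : ∀ (fuel : Nat) (t : List Char) (acc : Nat), t.length ≤ fuel →
    PySem.Chars.count.go pvMAS fuel t acc = acc + (pvSpecL t 0).length := by
  intro fuel
  induction fuel with
  | zero =>
    intro t acc h
    have : t = [] := List.eq_nil_of_length_eq_zero (Nat.le_zero.1 h)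
    subst this
    simp [PySem.Chars.count.go, pvSpecL]
  | succ f ih =>
    intro t acc h
    cases t with
    | nil => simp [PySem.Chars.count.go, pvSpecL]
    | cons c t =>
      rw [PySem.Chars.count.go]
      by_cases hp : pvMAS.isPrefixOf (c :: t) = true
      · simp only [hp, if_true, if_pos hp]
        -- prefix gives c = 'M', t = 'A' :: 'S' :: rest
        obtain ⟨rest, hrest⟩ : ∃ rest, c :: t = 'M' :: 'A' :: 'S' :: rest := by
          have := List.isPrefixOf_iff_prefix.1 hp
          obtain ⟨r, hr⟩ := this
          exact ⟨r, hr.symm⟩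
        obtain ⟨hc, ht⟩ : c = 'M' ∧ t = 'A' :: 'S' :: rest := by simpa using hrest
        subst hc; subst ht
        have hdrop : List.drop pvMAS.length ('M' :: 'A' :: 'S' :: rest) = rest := rfl
        rw [hdrop]
        have hlen : rest.length ≤ f := by simp at h; omega
        rw [ih rest (acc + 1) hlen]
        have hs : (pvSpecL ('M' :: 'A' :: 'S' :: rest) 0).length = 1 + (pvSpecL rest 0).length := by
          simp only [pvSpecL]
          have h1 : pvMAS.isPrefixOf ('M' :: 'A' :: 'S' :: rest) = true := hp
          have h2 : pvMAS.isPrefixOf ('A' :: 'S' :: rest) = false := by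
            simp [pvMAS, List.isPrefixOf]
          have h3 : pvMAS.isPrefixOf ('S' :: rest) = false := by
            simp [pvMAS, List.isPrefixOf]
          simp [h1, h2, h3, pvSpecL_length_shift]
          omega
        rw [hs]; omega
      · simp only [hp, Bool.false_eq_true, if_false, if_neg hp]
        have hlen : t.length ≤ f := by simp at h; omega
        rw [ih t acc hlen]
        have hs : (pvSpecL (c :: t) 0).length = (pvSpecL t 0).length := by
          simp only [pvSpecL]
          simp [hp, pvSpecL_length_shift]
        rw [hs]

theorem pvCount (t : List Char) : PySem.Chars.count t pvMAS = (pvSpecL t 0).length := by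
  have h : pvMAS.isEmpty = false := rfl
  rw [PySem.Chars.count]
  rw [h]
  simp only [Bool.false_eq_true, if_false]
  simpa using pvCountGo t.length t 0 (Nat.le_refl _)

theorem pvFind (t : List Char) : PySem.Chars.find t pvMAS =
    match pvSpecL t 0 with | [] => -1 | j :: _ => (j : Int) := by
  rw [PySem.Chars.find]; exact pvFindGo t 0

theorem pvFindFrom (s : List Char) (m : Nat) (hm : m ≤ s.length) :
    PySem.Chars.findFrom s pvMAS (m : Int) none =
      match (pvSpecL s 0).filter (fun x => decide (m ≤ x)) with
      | [] => -1 | j :: _ => (j : Int) := by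
  rw [PySem.Chars.findFrom_natCast s pvMAS m hm, pvFind, pvSpecL_drop m s]
  cases hfe : (pvSpecL s 0).filter (fun x => decide (m ≤ x)) with
  | nil => simp
  | cons j tl =>
    have hj : j ∈ (pvSpecL s 0).filter (fun x => decide (m ≤ x)) := by
      rw [hfe]; exact List.mem_cons_self
    have hmj : m ≤ j := by simpa using (List.mem_filter.1 hj).2
    simp only [List.map_cons]
    have : ((j - m : Nat) : Int) ≠ -1 := by omega
    simp only [this, if_neg this]
    rw [Nat.cast_sub hmj]
    simp

-- the A-side loop step, with the centre function g abstracted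
def pvStep (s : List Char) (g : Int → Int × Int) (st : Int × List (Int × Int)) : Int × List (Int × Int) :=
  (PySem.Chars.findFrom s pvMAS (st.1 + 1) none,
   st.2 ++ [g (PySem.Chars.findFrom s pvMAS (st.1 + 1) none)])

theorem pvFoldlIgnore {α σ : Type} (l : List α) (g : σ → σ) : ∀ st : σ,
    l.foldl (fun st _ => g st) st = g^[l.length] st := by
  induction l with
  | nil => intro st; rfl
  | cons x l ih => intro st; simp [List.foldl_cons, ih, Function.iterate_succ_apply]

theorem pvMaster (s : List Char) (g : Int → Int × Int) :
    ∀ (r : List Nat) (m : Nat) (acc : List (Int × Int)),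
      m ≤ s.length →
      (pvSpecL s 0).filter (fun x => decide (m ≤ x)) = r →
      ((pvStep s g)^[r.length] ((m : Int) - 1, acc)).2 = acc ++ r.map (fun (j : Nat) => g (j : Int)) := by
  intro r
  induction r with
  | nil => intro m acc _ _; simp
  | cons j r' ih =>
    intro m acc hm hf
    have hj : j ∈ (pvSpecL s 0).filter (fun x => decide (m ≤ x)) := by
      rw [hf]; exact List.mem_cons_self
    have hjs : j ∈ pvSpecL s 0 := (List.mem_filter.1 hj).1
    have hmj : m ≤ j := by simpa using (List.mem_filter.1 hj).2
    have hjlen : j < s.length := by simpa using pvSpecL_lt_length hjs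
    have hstep : pvStep s g ((m : Int) - 1, acc) = ((j : Int), acc ++ [g (j : Int)]) := by
      have harg : ((m : Int) - 1) + 1 = (m : Int) := by ring
      have := pvFindFrom s m hm
      rw [hf] at this
      simp only [pvStep, harg, this]
    rw [List.length_cons, Function.iterate_succ_apply, hstep]
    have hcast : ((j : Int), acc ++ [g (j : Int)]) = (((j + 1 : Nat) : Int) - 1, acc ++ [g (j : Int)]) := by
      rw [Prod.mk.injEq]
      constructor
      · push_cast; ring
      · rfl
    rw [hcast]
    rw [ih (j + 1) (acc ++ [g (j : Int)]) (by omega) ?_]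
    · simp
    · -- filter (j+1 ≤ ·) = r'
      have hpair : ((pvSpecL s 0).filter (fun x => decide (m ≤ x))).Pairwise (· < ·) :=
        (pvSpecL_pairwise s 0).sublist List.filter_sublist
      rw [hf] at hpair
      have hall : ∀ y ∈ r', j < y := fun y hy => (List.pairwise_cons.1 hpair).1 y hy
      have h1 : (pvSpecL s 0).filter (fun x => decide (j + 1 ≤ x)) =
          ((pvSpecL s 0).filter (fun x => decide (m ≤ x))).filter (fun x => decide (j + 1 ≤ x)) := by
        rw [List.filter_filter]
        apply List.filter_congr
        intro x _
        by_cases hx : j + 1 ≤ x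
        · have : m ≤ x := by omega
          simp [hx, this]
        · simp [hx]
      rw [h1, hf]
      simp only [List.filter_cons]
      have hje : (decide (j + 1 ≤ j)) = false := by simp
      rw [hje]
      simp only [Bool.false_eq_true, if_false]
      apply List.filter_eq_self.2
      intro y hy
      simpa using Nat.succ_le_of_lt (hall y hy)

theorem pvSpecFilterRange (s : List Char) :
    pvSpecL s 0 = (List.range s.length).filter (fun i => pvMAS.isPrefixOf (s.drop i)) := by
  induction s with
  | nil => simp [pvSpecL]
  | cons c t ih =>
    have hspec : pvSpecL (c :: t) 0 =
        (if pvMAS.isPrefixOf (c :: t) then [0] else []) ++ (pvSpecL t 0).map (· + 1) := by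
      simp only [pvSpecL, pvSpecL_shift t 1]
      split <;> simp
    rw [hspec, ih]
    rw [List.length_cons, List.range_succ_eq_map]
    simp only [List.filter_cons, List.filter_map]
    have hcomp : ((fun i => pvMAS.isPrefixOf ((c :: t).drop i)) ∘ (· + 1)) =
        (fun i => pvMAS.isPrefixOf (t.drop i)) := by
      funext x; simp [Function.comp]
    rw [hcomp]
    simp only [List.drop_zero]
    split <;> simp

theorem pvRangeCut (p : Nat → Bool) (n m : Nat) (hmn : m ≤ n) (hfalse : ∀ i, m ≤ i → p i = false) :
    (List.range n).filter p = (List.range m).filter p := by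
  have : n = m + (n - m) := by omega
  rw [this, List.range_add, List.filter_append]
  have h2 : ((List.range (n - m)).map (m + ·)).filter p = [] := by
    apply List.filter_eq_nil_iff.2
    intro a ha
    obtain ⟨k, _, rfl⟩ := List.mem_map.1 ha
    simp [hfalse (m + k) (by omega)]
  rw [h2, List.append_nil]

theorem pvPrefixFalse (s : List Char) (i : Nat) (hi : s.length - 2 ≤ i) :
    pvMAS.isPrefixOf (s.drop i) = false := by
  by_contra h
  have h' : pvMAS.isPrefixOf (s.drop i) = true := by
    cases hb : pvMAS.isPrefixOf (s.drop i) with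
    | true => rfl
    | false => exact absurd hb h
  have := (List.isPrefixOf_iff_prefix.1 h').length_le
  simp [pvMAS] at this
  omega

-- B's slice test, reduced to the isPrefixOf predicate
theorem pvSliceTest (line : String) (k : Nat) :
    (PySem.Str.slice line (some ((k : Int))) (some ((k : Int) + 3)) == "MAS")
      = pvMAS.isPrefixOf (line.toList.drop k) := by
  rw [Bool.eq_iff_iff]
  constructor
  · intro h
    have heq : PySem.Str.slice line (some ((k : Int))) (some ((k : Int) + 3)) = "MAS" := by
      exact eq_of_beq h
    have hl : (PySem.Str.slice line (some ((k : Int))) (some ((k : Int) + 3))).toList = pvMAS := by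
      rw [heq]; rfl
    rw [PySem.Str.toList_slice] at hl
    have h3 : ((k : Int) + 3) = (((k + 3 : Nat)) : Int) := by push_cast; ring
    rw [h3, PySem.Chars.slice_eq_listSlice, PySem.List.slice_natCast] at hl
    have htk : (line.toList.drop k).take 3 = pvMAS := by
      have : k + 3 - k = 3 := by omega
      rwa [this] at hl
    apply List.isPrefixOf_iff_prefix.2
    rw [List.prefix_iff_eq_take]
    exact htk.symm
  · intro h
    have hpre := List.prefix_iff_eq_take.1 (List.isPrefixOf_iff_prefix.1 h)
    apply beq_iff_eq.2
    apply String.toList_inj.1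
    rw [PySem.Str.toList_slice]
    have h3 : ((k : Int) + 3) = (((k + 3 : Nat)) : Int) := by push_cast; ring
    rw [h3, PySem.Chars.slice_eq_listSlice, PySem.List.slice_natCast]
    have : k + 3 - k = 3 := by omega
    rw [this]
    have hm3 : pvMAS.length = 3 := rfl
    rw [← hm3, ← hpre]; rfl

-- per-line equality: A's count/findFrom loop and B's window scan both produce the centres of pvSpecL
theorem pvLineA (line : String) (g : Int → Int × Int) (acc : List (Int × Int)) :
    ((PySem.List.pyRange 0 ((PySem.Chars.count line.toList pvMAS : Nat) : Int) 1).foldl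
      (fun (st : Int × List (Int × Int)) _ => pvStep line.toList g st) ((-1 : Int), acc)).2
      = acc ++ (pvSpecL line.toList 0).map (fun (j : Nat) => g (j : Int)) := by
  rw [pvFoldlIgnore]
  have hlen : (PySem.List.pyRange 0 ((PySem.Chars.count line.toList pvMAS : Nat) : Int) 1).length
      = (pvSpecL line.toList 0).length := by
    rw [PySem.List.length_pyRange_one]
    simp [pvCount]
  rw [hlen]
  have h0 : ((-1 : Int), acc) = (((0 : Nat) : Int) - 1, acc) := by norm_num
  rw [h0]
  exact pvMaster line.toList g (pvSpecL line.toList 0) 0 acc (Nat.zero_le _)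
    (List.filter_eq_self.2 (fun x _ => by simp))

theorem pvLineB (line : String) (g : Int → Int × Int) (acc : List (Int × Int)) :
    (PySem.List.pyRange 0 ((line.toList.length : Int) - 2) 1).foldl
      (fun acc i => if PySem.Str.slice line (some i) (some (i + 3)) == "MAS"
                    then acc ++ [g i] else acc) acc
      = acc ++ (pvSpecL line.toList 0).map (fun (j : Nat) => g (j : Int)) := by
  rw [PySem.List.foldl_append_if]
  congr 1
  rw [PySem.List.pyRange_one]
  rw [List.filter_map, List.map_map]
  have htn : (((line.toList.length : Int) - 2) - 0).toNat = line.toList.length - 2 := by omega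
  rw [htn]
  have hcomp : ((fun i => PySem.Str.slice line (some i) (some (i + 3)) == "MAS") ∘ (fun k : Nat => (0 : Int) + (k : Int)))
      = (fun k : Nat => pvMAS.isPrefixOf (line.toList.drop k)) := by
    funext k
    simp only [Function.comp, Int.zero_add]
    exact pvSliceTest line k
  rw [hcomp]
  rw [← pvRangeCut _ line.toList.length (line.toList.length - 2) (by omega)
        (fun i hi => pvPrefixFalse line.toList i hi)]
  rw [← pvSpecFilterRange]
  apply List.map_congr_left
  intro x _
  simp

-- per line-and-coordinate pair, A's inner loop equals B's inner loop
theorem pvPair (is_rev : Bool) (acc : List (Int × Int)) (line : String) (sx sy : Int) :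
    ((PySem.List.pyRange 0 ((PySem.Str.count line "MAS" : Nat) : Int) 1).foldl
      (fun (st : Int × List (Int × Int)) _ =>
        let last_found := PySem.Str.findFrom line "MAS" (st.1 + 1) none
        if !is_rev then
          (last_found, st.2 ++ [(sx + last_found + 1, sy + last_found + 1)])
        else
          (last_found, st.2 ++ [(sx + PySem.Str.len line - last_found - 2,
                                 sy + PySem.Str.len line - last_found - 2)]))
      ((-1 : Int), acc)).2
    = (PySem.List.pyRange 0 (PySem.Str.len line - 2) 1).foldl
      (fun acc2 i =>
        if PySem.Str.slice line (some i) (some (i + 3)) == "MAS" then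
          let c := if is_rev then PySem.Str.len line - i - 2 else i + 1
          acc2 ++ [(sx + c, sy + c)]
        else acc2) acc := by
  have hmas : ("MAS" : String).toList = pvMAS := rfl
  cases is_rev with
  | false =>
    have hA : (fun (st : Int × List (Int × Int)) (_ : Int) =>
        let last_found := PySem.Str.findFrom line "MAS" (st.1 + 1) none
        if !(false : Bool) then
          (last_found, st.2 ++ [(sx + last_found + 1, sy + last_found + 1)])
        else
          (last_found, st.2 ++ [(sx + PySem.Str.len line - last_found - 2,
                                 sy + PySem.Str.len line - last_found - 2)]))
        = (fun st _ => pvStep line.toList (fun lf => (sx + lf + 1, sy + lf + 1)) st) := by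
      funext st u
      simp [pvStep, PySem.Str.findFrom_eq, hmas]
    have hcnt : PySem.Str.count line "MAS" = PySem.Chars.count line.toList pvMAS := by
      rw [PySem.Str.count_eq, hmas]
    rw [hA, hcnt, pvLineA line (fun lf => (sx + lf + 1, sy + lf + 1)) acc]
    have hB : (fun (acc2 : List (Int × Int)) (i : Int) =>
        if PySem.Str.slice line (some i) (some (i + 3)) == "MAS" then
          let c := if (false : Bool) then PySem.Str.len line - i - 2 else i + 1
          acc2 ++ [(sx + c, sy + c)]
        else acc2)
        = (fun acc2 i => if PySem.Str.slice line (some i) (some (i + 3)) == "MAS"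
                         then acc2 ++ [(fun lf : Int => (sx + (lf + 1), sy + (lf + 1))) i] else acc2) := by
      funext acc2 i
      simp
    rw [PySem.Str.len_eq] at hB ⊢
    rw [hB, pvLineB line (fun lf => (sx + (lf + 1), sy + (lf + 1))) acc]
    congr 1
    apply List.map_congr_left
    intro x _
    rw [Prod.mk.injEq]
    constructor <;> ring
  | true =>
    have hA : (fun (st : Int × List (Int × Int)) (_ : Int) =>
        let last_found := PySem.Str.findFrom line "MAS" (st.1 + 1) none
        if !(true : Bool) then
          (last_found, st.2 ++ [(sx + last_found + 1, sy + last_found + 1)])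
        else
          (last_found, st.2 ++ [(sx + PySem.Str.len line - last_found - 2,
                                 sy + PySem.Str.len line - last_found - 2)]))
        = (fun st _ => pvStep line.toList
            (fun lf => (sx + (line.toList.length : Int) - lf - 2,
                        sy + (line.toList.length : Int) - lf - 2)) st) := by
      funext st u
      simp [pvStep, PySem.Str.findFrom_eq, hmas, PySem.Str.len_eq]
    have hcnt : PySem.Str.count line "MAS" = PySem.Chars.count line.toList pvMAS := by
      rw [PySem.Str.count_eq, hmas]
    rw [hA, hcnt, pvLineA line (fun lf => (sx + (line.toList.length : Int) - lf - 2,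
                        sy + (line.toList.length : Int) - lf - 2)) acc]
    have hB : (fun (acc2 : List (Int × Int)) (i : Int) =>
        if PySem.Str.slice line (some i) (some (i + 3)) == "MAS" then
          let c := if (true : Bool) then PySem.Str.len line - i - 2 else i + 1
          acc2 ++ [(sx + c, sy + c)]
        else acc2)
        = (fun acc2 i => if PySem.Str.slice line (some i) (some (i + 3)) == "MAS"
                         then acc2 ++ [(fun lf : Int =>
                              (sx + (PySem.Str.len line - lf - 2), sy + (PySem.Str.len line - lf - 2))) i] else acc2) := by
      funext acc2 i
      simp
    rw [PySem.Str.len_eq] at hB ⊢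
    rw [hB, pvLineB line (fun lf => (sx + ((line.toList.length : Int) - lf - 2),
                                     sy + ((line.toList.length : Int) - lf - 2))) acc]
    congr 1
    apply List.map_congr_left
    intro x _
    rw [Prod.mk.injEq]
    constructor <;> ring

-- ===== VERDICT (by name: the statement is the Claim_ definition above) =====
theorem find_mas_rl_spec : Claim_equal_find_mas_rl := by
  intro input coord is_rev _
  unfold Spec_find_mas_rl find_mas_rl find_mas_rl_alt
  apply PySem.List.foldl_congr_mem
  intro acc p _
  exact pvPair is_rev acc p.1 p.2.1 p.2.2
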